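-- pv_equiv track=rewrite | github.com/EduardoRSO/bla | L3/3d.py | solution
-- ===== SOURCE A (Python) =====
-- def solution(s):
--     n = len(s)
--     transitions = [0]*n
--     for i in range(1,n):
--         transitions[i] = 0
--         if s[i] == s[i - 1]:
--             transitions[i] = transitions[i - 1] + 1
--         else:
--             transitions[i] = transitions[i - 1]
--     return transitions
-- ===== SOURCE B (Python) =====
-- def solution(s):
--     # Run-length decomposition: each maximal run of L equal characters, entered
--     # with pair-count c, contributes the arithmetic block c, c+1, ..., c+L-1.
--     out = []
--     c = 0
--     i = 0
--     n = len(s)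
--     while i < n:
--         j = i
--         while j < n and s[j] == s[i]:
--             j += 1
--         L = j - i
--         out.extend(range(c, c + L))
--         c += L - 1
--         i = j
--     return out
-- ===== Notes on version B (the rewrite author's own statement) =====
-- stated objective: alternative
-- what changed: Replaces A's per-character prefix-sum recurrence (transitions[i] from transitions[i-1]) with a run-length decomposition: a two-pointer scan finds each maximal run of equal characters and emits a whole arithmetic range(c, c+L) block per run, advancing the count by L-1.
import Mathlib
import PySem

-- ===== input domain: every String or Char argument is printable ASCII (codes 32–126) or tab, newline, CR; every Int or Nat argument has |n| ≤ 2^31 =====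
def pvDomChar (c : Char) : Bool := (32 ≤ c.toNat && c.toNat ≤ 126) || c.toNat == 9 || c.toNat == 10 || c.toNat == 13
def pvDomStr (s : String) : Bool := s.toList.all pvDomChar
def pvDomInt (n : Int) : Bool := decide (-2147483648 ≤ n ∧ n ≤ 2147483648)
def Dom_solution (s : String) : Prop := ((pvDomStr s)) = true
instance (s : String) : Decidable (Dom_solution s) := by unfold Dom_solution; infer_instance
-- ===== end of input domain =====

-- B replaces A's per-character prefix-sum recurrence with a run-length decomposition:
-- a two-pointer scan finds each maximal run of equal characters and emits a whole
-- range(c, c+L) block per run; objective: alternative algorithm, same cost.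

-- ===== PORT A =====
-- literal transliteration of A: preallocated zero array, 'for i in range(1, n)' updating
-- transitions[i] from transitions[i-1] (including the dead 'transitions[i] = 0' write)
def solution (s : String) : List Int :=
  let cs := s.toList
  let n : Int := cs.length
  let transitions : List Int := List.replicate cs.length 0
  (PySem.List.pyRange 1 n 1).foldl
    (fun t i =>
      let t1 := PySem.List.pySetD t i 0
      if PySem.List.pyGetD cs i ' ' == PySem.List.pyGetD cs (i - 1) ' ' then
        PySem.List.pySetD t1 i (PySem.List.pyGetD t1 (i - 1) 0 + 1)
      else
        PySem.List.pySetD t1 i (PySem.List.pyGetD t1 (i - 1) 0))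
    transitions

-- ===== PORT B =====
-- transliteration of Source B's outer while loop: the remaining characters are the suffix
-- s[i:]; the inner 'while j < n and s[j] == s[i]' scan is the takeWhile/dropWhile split
-- of that suffix at its leading run; 'out.extend(range(c, c + L))' is the pyRange block
def pvRunsB : List Char → Int → List Int
  | [], _ => []
  | x :: xs, c =>
    let t := xs.takeWhile (· == x)
    let L : Int := ((t.length + 1 : Nat) : Int)
    PySem.List.pyRange c (c + L) 1 ++ pvRunsB (xs.dropWhile (· == x)) (c + L - 1)
termination_by cs _ => cs.length
decreasing_by
  exact Nat.lt_succ_of_le (List.length_dropWhile_le _ _)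

def solution_alt (s : String) : List Int :=
  pvRunsB s.toList 0

-- ===== PRECONDITION & SPEC =====
def Spec_solution (s : String) (out : List Int) : Prop := out = solution_alt s
instance (s : String) (out : List Int) : Decidable (Spec_solution s out) := by unfold Spec_solution; infer_instance

-- ===== CLAIM (what is proved, stated in full; the proofs are below) =====
def Claim_equal_solution : Prop := ∀ (s : String), Dom_solution s → Spec_solution s (solution s)

-- ===== LEMMAS AND PROOFS =====

-- the common value: pvGo prev c xs produces the running pair count continuing from
-- previous char `prev` and count `c`; pvExp cs is the whole expected output
def pvGo (prev : Char) (c : Int) : List Char → List Int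
  | [] => []
  | x :: xs => (if x == prev then c + 1 else c) :: pvGo x (if x == prev then c + 1 else c) xs

def pvExp : List Char → List Int
  | [] => []
  | x :: xs => 0 :: pvGo x 0 xs

theorem pvGo_length (prev : Char) (c : Int) (xs : List Char) :
    (pvGo prev c xs).length = xs.length := by
  induction xs generalizing prev c with
  | nil => rfl
  | cons x xs ih => simp [pvGo, ih]

theorem pvExp_length (cs : List Char) : (pvExp cs).length = cs.length := by
  cases cs with
  | nil => rfl
  | cons x xs => simp [pvExp, pvGo_length]

theorem pvGo_getD_succ (xs : List Char) (prev : Char) (c : Int) (j : Nat)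
    (h : j + 1 < xs.length) :
    (pvGo prev c xs).getD (j + 1) 0 =
      (pvGo prev c xs).getD j 0 + (if xs.getD (j+1) ' ' == xs.getD j ' ' then 1 else 0) := by
  induction xs generalizing prev c j with
  | nil => simp at h
  | cons x xs ih =>
    cases j with
    | zero =>
      cases xs with
      | nil => simp at h
      | cons y ys =>
        simp only [pvGo, List.getD_cons_succ, List.getD_cons_zero]
        split_ifs <;> omega
    | succ j =>
      simp only [pvGo, List.getD_cons_succ]
      exact ih x _ j (by simpa using h)

theorem pvExp_getD_succ (cs : List Char) (k : Nat) (h : k + 1 < cs.length) :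
    (pvExp cs).getD (k + 1) 0 =
      (pvExp cs).getD k 0 + (if cs.getD (k+1) ' ' == cs.getD k ' ' then 1 else 0) := by
  cases cs with
  | nil => simp at h
  | cons x xs =>
    cases k with
    | zero =>
      cases xs with
      | nil => simp at h
      | cons y ys => simp [pvExp, pvGo]
    | succ k =>
      simp only [pvExp, List.getD_cons_succ]
      exact pvGo_getD_succ xs x 0 k (by simpa using h)

-- A's loop invariant: after processing range(1, k) the list is the first k expected
-- values followed by the untouched zeros
theorem pvA_inv (cs : List Char) (k : Nat) (hk : k ≤ cs.length) :
    (PySem.List.pyRange 1 (k : Int) 1).foldl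
      (fun t i =>
        let t1 := PySem.List.pySetD t i 0
        if PySem.List.pyGetD cs i ' ' == PySem.List.pyGetD cs (i - 1) ' ' then
          PySem.List.pySetD t1 i (PySem.List.pyGetD t1 (i - 1) 0 + 1)
        else
          PySem.List.pySetD t1 i (PySem.List.pyGetD t1 (i - 1) 0))
      (List.replicate cs.length 0) =
    (pvExp cs).take k ++ List.replicate (cs.length - k) 0 := by
  induction k with
  | zero =>
    rw [PySem.List.pyRange_one_eq_nil (by norm_num)]
    simp
  | succ k ih =>
    rcases Nat.eq_zero_or_pos k with hk0 | hkpos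
    · subst hk0
      rw [show ((0 + 1 : Nat) : Int) = 1 by norm_num,
        PySem.List.pyRange_one_eq_nil (by norm_num)]
      simp only [List.foldl_nil]
      obtain ⟨x, xs, rfl⟩ : ∃ x xs, cs = x :: xs := by
        cases cs with
        | nil => simp at hk
        | cons x xs => exact ⟨_, _, rfl⟩
      simp [pvExp, List.replicate_succ]
    · have hk' : k ≤ cs.length := le_trans (Nat.le_succ k) hk
      have hkn : k < cs.length := hk
      have hrange : PySem.List.pyRange 1 ((k + 1 : Nat) : Int) 1
          = PySem.List.pyRange 1 (k : Int) 1 ++ [(k : Int)] := by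
        push_cast
        exact PySem.List.pyRange_one_succ_right (by exact_mod_cast hkpos)
      rw [hrange, List.foldl_append, ih hk']
      set E := pvExp cs with hE
      have hElen : E.length = cs.length := pvExp_length cs
      set st := E.take k ++ List.replicate (cs.length - k) (0 : Int) with hst
      have hstlen : st.length = cs.length := by
        simp [hst, hElen, List.length_take]
        omega
      simp only [List.foldl_cons, List.foldl_nil]
      have hone : (k : Int) - 1 = ((k - 1 : Nat) : Int) := by omega
      -- the intermediate array with the dead zero write
      have ht1 : PySem.List.pySetD st (k : Int) 0 = st.set k 0 := by
        simp [PySem.List.pySetD_natCast]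
      -- value read at k-1
      have hread : PySem.List.pyGetD (st.set k 0) ((k : Int) - 1) 0 = E.getD (k - 1) 0 := by
        rw [hone, PySem.List.pyGetD_natCast, List.getD_eq_getElem?_getD,
          List.getElem?_set_ne (by omega : k ≠ k - 1), hst,
          List.getElem?_append_left (by simp [List.length_take]; omega),
          List.getElem?_take_of_lt (by omega), List.getD_eq_getElem?_getD]
      have hchar : PySem.List.pyGetD cs ((k : Nat) : Int) ' ' = cs.getD k ' ' :=
        PySem.List.pyGetD_natCast cs k ' '
      have hcharm : PySem.List.pyGetD cs ((k : Int) - 1) ' ' = cs.getD (k - 1) ' ' := by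
        rw [hone]; exact PySem.List.pyGetD_natCast cs (k - 1) ' '
      -- the expected recurrence at index k
      have hrec : E.getD (k - 1) 0 + (if cs.getD k ' ' == cs.getD (k - 1) ' ' then (1:Int) else 0)
          = E.getD k 0 := by
        have h1 : k - 1 + 1 = k := Nat.succ_pred_eq_of_pos hkpos
        have := pvExp_getD_succ cs (k - 1) (by omega)
        rw [h1] at this
        rw [this]
      -- the written array
      have hwrite : ∀ (v : Int),
          PySem.List.pySetD (st.set k 0) (k : Int) v = st.set k v := by
        intro v
        simp [PySem.List.pySetD_natCast, List.set_set]
      have hfin : st.set k (E.getD k 0)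
          = E.take (k + 1) ++ List.replicate (cs.length - (k + 1)) 0 := by
        have hEk : E[k]? = some (E.getD k 0) := by
          have : k < E.length := by omega
          simp [List.getD, List.getElem?_eq_getElem this]
        have htk : E.take (k + 1) = E.take k ++ [E.getD k 0] := by
          rw [List.take_add_one, hEk]; rfl
        have hrep : List.replicate (cs.length - k) (0 : Int)
            = 0 :: List.replicate (cs.length - (k + 1)) 0 := by
          have : cs.length - k = (cs.length - (k + 1)) + 1 := by omega
          rw [this, List.replicate_succ]
        have hlen : (E.take k).length ≤ k := by simp [List.length_take]
        rw [hst, hrep, List.set_append_right _ _ hlen, htk]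
        have : (k - (E.take k).length) = 0 := by
          simp [List.length_take]
          omega
        rw [this, List.set_cons_zero, List.append_assoc, List.singleton_append]
      rw [ht1, hread, hchar, hcharm]
      by_cases hc : cs.getD k ' ' == cs.getD (k - 1) ' '
      · rw [if_pos hc, hwrite]
        rw [show E.getD (k-1) 0 + 1 = E.getD (k-1) 0 + (if cs.getD k ' ' == cs.getD (k - 1) ' ' then (1:Int) else 0) by rw [if_pos hc]]
        rw [hrec, hfin]
      · rw [if_neg hc, hwrite]
        rw [show E.getD (k-1) 0 = E.getD (k-1) 0 + (if cs.getD k ' ' == cs.getD (k - 1) ' ' then (1:Int) else 0) by rw [if_neg hc]; ring]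
        rw [hrec, hfin]

-- B side: pvGo over a block of k copies of x is an arithmetic range
theorem pvGo_run (k : Nat) (rest : List Char) (x : Char) (c : Int) :
    pvGo x c (List.replicate k x ++ rest) =
      PySem.List.pyRange (c + 1) (c + 1 + k) 1 ++ pvGo x (c + k) rest := by
  induction k generalizing c with
  | zero =>
    rw [show ((0 : Nat) : Int) = 0 by norm_num]
    rw [PySem.List.pyRange_one_eq_nil (by omega)]
    simp
  | succ k ih =>
    rw [List.replicate_succ, List.cons_append]
    have h1 : pvGo x c (x :: (List.replicate k x ++ rest))
        = (c + 1) :: pvGo x (c + 1) (List.replicate k x ++ rest) := by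
      simp [pvGo]
    rw [h1, ih (c + 1)]
    have h2 : PySem.List.pyRange (c + 1) (c + 1 + ((k + 1 : Nat) : Int)) 1
        = (c + 1) :: PySem.List.pyRange (c + 1 + 1) (c + 1 + 1 + (k : Nat)) 1 := by
      rw [show c + 1 + ((k + 1 : Nat) : Int) = c + 1 + 1 + (k : Nat) by push_cast; ring]
      rw [PySem.List.pyRange_one_cons (by omega)]
    rw [h2, show c + ((k + 1 : Nat) : Int) = c + 1 + (k : Nat) by push_cast; ring]
    simp

-- B's run recursion computes exactly c :: pvGo x c xs on a nonempty suffix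
theorem pvRunsB_cons (n : Nat) : ∀ (x : Char) (xs : List Char) (c : Int), xs.length ≤ n →
    pvRunsB (x :: xs) c = c :: pvGo x c xs := by
  induction n with
  | zero =>
    intro x xs c h
    have hxs : xs = [] := List.eq_nil_of_length_eq_zero (Nat.le_zero.mp h)
    subst hxs
    rw [pvRunsB]
    simp only [List.takeWhile_nil, List.dropWhile_nil, List.length_nil]
    rw [pvRunsB]
    rw [show ((0 + 1 : Nat) : Int) = 1 by norm_num]
    rw [PySem.List.pyRange_one_cons (by omega), PySem.List.pyRange_one_eq_nil (by omega)]
    simp [pvGo]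
  | succ n ih =>
    intro x xs c h
    rw [pvRunsB]
    set t := xs.takeWhile (· == x) with hT
    set rest := xs.dropWhile (· == x) with hR
    have hsplit : t ++ rest = xs := List.takeWhile_append_dropWhile
    have htx : ∀ a ∈ t, a = x := by
      intro a haT
      rw [hT] at haT
      exact eq_of_beq (List.mem_takeWhile_imp (p := fun b => b == x) (l := xs) haT)
    have htrep : t = List.replicate t.length x := List.eq_replicate_of_mem htx
    have hLen : rest.length ≤ xs.length := by
      rw [hR]; exact List.length_dropWhile_le _ _
    have hrange : PySem.List.pyRange c (c + ((t.length + 1 : Nat) : Int)) 1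
        = c :: PySem.List.pyRange (c + 1) (c + 1 + (t.length : Nat)) 1 := by
      rw [show c + ((t.length + 1 : Nat) : Int) = c + 1 + (t.length : Nat) by push_cast; ring]
      rw [PySem.List.pyRange_one_cons (by omega)]
    have hc' : c + ((t.length + 1 : Nat) : Int) - 1 = c + (t.length : Nat) := by
      push_cast; ring
    rw [hrange, hc']
    have hgo : pvGo x c xs
        = PySem.List.pyRange (c + 1) (c + 1 + t.length) 1 ++ pvGo x (c + t.length) rest := by
      conv_lhs => rw [← hsplit, htrep]
      exact pvGo_run t.length rest x c
    rw [hgo]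
    simp only [List.cons_append]
    congr 2
    cases hrest : rest with
    | nil => rw [pvRunsB]; simp [pvGo]
    | cons y ys =>
      have hhead := List.head?_dropWhile_not (· == x) xs
      rw [← hR, hrest] at hhead
      simp only [List.head?_cons] at hhead
      have hy : ¬ (y == x) = true := by simp [hhead]
      have hylt : ys.length ≤ n := by
        rw [hrest] at hLen
        simp only [List.length_cons] at hLen
        omega
      rw [ih y ys (c + t.length) hylt]
      simp [pvGo, hy]

theorem pvA_eq (s : String) : solution s = pvExp s.toList := by
  show (PySem.List.pyRange 1 (s.toList.length : Int) 1).foldl _ _ = _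
  rw [pvA_inv s.toList s.toList.length le_rfl, Nat.sub_self, List.replicate_zero,
    List.append_nil, List.take_of_length_le (le_of_eq (pvExp_length s.toList))]

theorem pvB_eq (s : String) : solution_alt s = pvExp s.toList := by
  unfold solution_alt
  cases hcs : s.toList with
  | nil => rw [pvRunsB]; rfl
  | cons x xs =>
    rw [pvRunsB_cons xs.length x xs 0 le_rfl]
    rfl

-- ===== VERDICT (by name: the statement is the Claim_ definition above) =====
theorem solution_spec : Claim_equal_solution := by
  intro s _
  show solution s = solution_alt s
  rw [pvA_eq, pvB_eq]
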